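-- pv_equiv track=rewrite | github.com/MariannaSh/Python-Tasks | 04-Subroutines/36.py | f
-- ===== SOURCE A (Python) =====
-- def f(n):
--     count=0
--     max_count=0
--     for i in n:
--         if i=="+":
--             count+=1
--             max_count=max(count,max_count)
--         else:
--             count-=1
--     if max_count>=3:
--         return True
--     else:
--         return False
-- ===== SOURCE B (Python) =====
-- def f(n):
--     # Divide and conquer: scan(s) returns (total balance of s, highest prefix
--     # balance of s, the empty prefix counting as 0).  For a split s = L + R the
--     # peak is max(peak(L), total(L) + peak(R)).  Peak >= 3 iff A's max_count does.
--     def scan(s):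
--         if not s:
--             return (0, 0)
--         if len(s) == 1:
--             d = 1 if s == "+" else -1
--             return (d, max(0, d))
--         mid = len(s) // 2
--         ltot, lbest = scan(s[:mid])
--         rtot, rbest = scan(s[mid:])
--         return (ltot + rtot, max(lbest, ltot + rbest))
--     return scan(n)[1] >= 3
-- ===== Notes on version B (the rewrite author's own statement) =====
-- stated objective: alternative
-- what changed: Replaces the stateful left-to-right running-balance/running-max loop with a divide-and-conquer recursion: split the string in half, recursively compute (total balance, peak prefix balance) of each half, and combine with peak(L+R) = max(peak L, total L + peak R).
import Mathlib
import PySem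

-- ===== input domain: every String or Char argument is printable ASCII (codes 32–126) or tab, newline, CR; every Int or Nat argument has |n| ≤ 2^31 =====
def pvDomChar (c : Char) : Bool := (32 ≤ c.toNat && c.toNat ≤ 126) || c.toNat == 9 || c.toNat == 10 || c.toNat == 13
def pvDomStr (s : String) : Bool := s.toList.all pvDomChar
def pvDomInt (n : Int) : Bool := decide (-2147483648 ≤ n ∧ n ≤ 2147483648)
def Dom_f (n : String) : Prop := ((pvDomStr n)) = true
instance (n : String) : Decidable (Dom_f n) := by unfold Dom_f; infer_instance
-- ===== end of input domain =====

-- B replaces A's stateful left-to-right running-max loop with a divide-and-conquer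
-- recursion combining (total, peak) of the two halves; alternative algorithm, not faster.

-- ===== PORT A =====
def f (n : String) : Bool :=
  if (n.toList.foldl
      (fun (st : Int × Int) i =>
        if i = '+' then (st.1 + 1, max (st.1 + 1) st.2) else (st.1 - 1, st.2))
      (0, 0)).2 ≥ 3 then true else false

-- ===== PORT B =====
-- scan(s) of Source B; 'len(s) // 2' on the nonnegative length is exactly Nat division,
-- and the slices s[:mid] / s[mid:] with 0 ≤ mid ≤ len are exactly take/drop.
def pvScan : List Char → Int × Int
  | [] => (0, 0)
  | [x] => ((if x = '+' then 1 else -1), max 0 (if x = '+' then 1 else -1))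
  | x :: y :: rest =>
      let s := x :: y :: rest
      let mid := s.length / 2
      let L := pvScan (s.take mid)
      let R := pvScan (s.drop mid)
      (L.1 + R.1, max L.2 (L.1 + R.2))
termination_by s => s.length
decreasing_by
  · simp [List.length_take]; omega
  · simp; omega

def f_alt (n : String) : Bool := decide ((pvScan n.toList).2 ≥ 3)

-- ===== PRECONDITION & SPEC =====
def Spec_f (n : String) (out : Bool) : Prop := out = f_alt n
instance (n : String) (out : Bool) : Decidable (Spec_f n out) := by unfold Spec_f; infer_instance

-- ===== CLAIM (what is proved, stated in full; the proofs are below) =====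
def Claim_equal_f : Prop := ∀ (n : String), Dom_f n → Spec_f n (f n)

-- ===== LEMMAS AND PROOFS =====

-- total balance of a list: +1 per '+', -1 per other char
def pvBal (t : List Char) : Int := 2 * (t.count '+') - t.length

theorem pvBal_nil : pvBal [] = 0 := by simp [pvBal]

theorem pvBal_cons (x : Char) (t : List Char) :
    pvBal (x :: t) = (if x = '+' then 1 else -1) + pvBal t := by
  by_cases hx : x = '+' <;> simp [pvBal, hx] <;> ring

theorem pvBal_append (L R : List Char) : pvBal (L ++ R) = pvBal L + pvBal R := by
  simp [pvBal]; ring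

-- running balances starting from c (excluding c itself), as A's loop walks them
def pvS (c : Int) : List Char → List Int
  | [] => []
  | x :: xs => (c + (if x = '+' then 1 else -1)) :: pvS (c + (if x = '+' then 1 else -1)) xs

-- A's running max equals folding max over the running balances (invariant c ≤ m + 1)
theorem pvA_max (l : List Char) (c m : Int) (h : c ≤ m + 1) :
    (l.foldl (fun (st : Int × Int) i =>
        if i = '+' then (st.1 + 1, max (st.1 + 1) st.2) else (st.1 - 1, st.2)) (c, m)).2
      = (pvS c l).foldl max m := by
  induction l generalizing c m with
  | nil => simp [pvS]
  | cons x xs ih =>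
    by_cases hx : x = '+'
    · subst hx
      simp only [List.foldl_cons, pvS, if_true]
      rw [ih (c + 1) (max (c + 1) m) (by omega)]
      rw [max_comm]
    · simp only [List.foldl_cons, pvS, if_neg hx]
      rw [ih (c - 1) m (by omega)]
      have e : c + -1 = c - 1 := by ring
      have : max m (c - 1) = m := by omega
      rw [e, this]

theorem pvS_append (c : Int) (L R : List Char) :
    pvS c (L ++ R) = pvS c L ++ pvS (c + pvBal L) R := by
  induction L generalizing c with
  | nil => simp [pvS, pvBal_nil]
  | cons x xs ih =>
    simp only [List.cons_append, pvS, ih, pvBal_cons]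
    rw [add_assoc]

theorem pvS_shift (a b : Int) (l : List Char) :
    pvS (a + b) l = (pvS b l).map (a + ·) := by
  induction l generalizing b with
  | nil => simp [pvS]
  | cons x xs ih =>
    simp only [pvS, List.map_cons, add_assoc]
    rw [ih (b + (if x = '+' then 1 else -1))]

-- A's final max: the peak of the running balances, seeded with 0
def pvM (l : List Char) : Int := (pvS 0 l).foldl max 0

theorem pvM_nonneg (l : List Char) : 0 ≤ pvM l :=
  (PySem.List.le_foldl_max (pvS 0 l) 0).1

theorem pvM_ub (l : List Char) : ∀ x ∈ pvS 0 l, x ≤ pvM l :=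
  (PySem.List.le_foldl_max (pvS 0 l) 0).2

theorem pvM_mem (l : List Char) : pvM l = 0 ∨ pvM l ∈ pvS 0 l :=
  PySem.List.foldl_max_mem (pvS 0 l) 0

-- the final running balance c + pvBal l is an element of pvS c l (for l ≠ [])
theorem pvS_last_mem (l : List Char) (hl : l ≠ []) (c : Int) : c + pvBal l ∈ pvS c l := by
  induction l generalizing c with
  | nil => exact absurd rfl hl
  | cons x xs ih =>
    cases xs with
    | nil => simp [pvS, pvBal_cons, pvBal_nil]
    | cons y ys =>
      rw [pvBal_cons, ← add_assoc]
      show _ ∈ (c + (if x = '+' then 1 else -1)) :: pvS (c + (if x = '+' then 1 else -1)) (y :: ys)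
      exact List.mem_cons_of_mem _ (ih (by simp) _)

theorem pvBal_le_pvM (l : List Char) : pvBal l ≤ pvM l := by
  cases hl : l with
  | nil => simp [pvBal_nil, pvM_nonneg]
  | cons x xs =>
    have := pvM_ub (x :: xs) (0 + pvBal (x :: xs)) (pvS_last_mem (x :: xs) (by simp) 0)
    omega

-- peak of a concatenation
theorem pvM_append (L R : List Char) :
    pvM (L ++ R) = max (pvM L) (pvBal L + pvM R) := by
  have hsplit : pvS 0 (L ++ R) = pvS 0 L ++ (pvS 0 R).map (pvBal L + ·) := by
    rw [pvS_append, ← pvS_shift]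
    norm_num
  apply le_antisymm
  · rcases pvM_mem (L ++ R) with h0 | hm
    · have := pvM_nonneg L; omega
    · rw [hsplit, List.mem_append] at hm
      rcases hm with hL | hR
      · have := pvM_ub L _ hL; omega
      · rcases List.mem_map.1 hR with ⟨y, hy, hxy⟩
        have := pvM_ub R y hy
        omega
  · have h1 : pvM L ≤ pvM (L ++ R) := by
      rcases pvM_mem L with h0 | hm
      · have := pvM_nonneg (L ++ R); omega
      · exact pvM_ub (L ++ R) _ (by rw [hsplit]; exact List.mem_append_left _ hm)
    have h2 : pvBal L + pvM R ≤ pvM (L ++ R) := by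
      rcases pvM_mem R with h0 | hm
      · have := pvBal_le_pvM L; omega
      · exact pvM_ub (L ++ R) _
          (by rw [hsplit]; exact List.mem_append_right _ (List.mem_map.2 ⟨_, hm, rfl⟩))
    omega

theorem pvScan_eq (l : List Char) : pvScan l = (pvBal l, pvM l) := by
  fun_induction pvScan l with
  | case1 => simp [pvBal_nil, pvM, pvS]
  | case2 x =>
    simp [pvBal_cons, pvBal_nil, pvM, pvS]
  | case3 x y rest s mid L R ihL ihR =>
    simp only [L, R, s, mid] at ihL ihR ⊢
    rw [ihL, ihR]
    have hsplit : (x :: y :: rest) =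
        (x :: y :: rest).take ((x :: y :: rest).length / 2)
          ++ (x :: y :: rest).drop ((x :: y :: rest).length / 2) := by simp
    simp only [Prod.mk.injEq]
    constructor
    · conv_rhs => rw [hsplit]
      rw [pvBal_append]
    · conv_rhs => rw [hsplit]
      rw [pvM_append]

-- ===== VERDICT (by name: the statement is the Claim_ definition above) =====
theorem f_spec : Claim_equal_f := by
  intro n _
  unfold Spec_f f f_alt
  rw [pvA_max n.toList 0 0 (by omega)]
  rw [pvScan_eq]
  show (if pvM n.toList ≥ 3 then true else false) = decide (pvM n.toList ≥ 3)
  by_cases h : pvM n.toList ≥ 3 <;> simp [h]
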